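-- pv_equiv track=rewrite | github.com/codephage2020/odgg | backend/tests/test_eval_brief_quality.py | score_grain
-- ===== SOURCE A (Python) =====
-- def score_grain(result: dict) -> dict:
--     """Score grain suggestion against TPC-H ground truth."""
--     options = result.get("options", [])
--     scores = {
--         "has_options": len(options) > 0,
--         "has_recommended": False,
--         "recommends_lineitem_grain": False,
--         "has_reasoning": False,
--     }
--     for o in options:
--         if o.get("recommended"):
--             scores["has_recommended"] = True
--             source = (o.get("source_table") or "").lower()
--             desc = (o.get("description") or "").lower()
--             if "lineitem" in source or "lineitem" in desc or "line item" in desc: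
--                 scores["recommends_lineitem_grain"] = True
--         if o.get("reasoning"):
--             scores["has_reasoning"] = True
--     return scores
-- ===== SOURCE B (Python) =====
-- def score_grain(result: dict) -> dict:
--     """Score grain suggestion against TPC-H ground truth.
--
--     Re-implementation: four independent any()-based scans instead of one
--     stateful accumulating loop; the dict is assembled once at the end.
--     """
--     options = result.get("options", [])
--
--     def _recommended(o):
--         return bool(o.get("recommended"))
--
--     def _mentions_lineitem(o):
--         source = (o.get("source_table") or "").lower()
--         desc = (o.get("description") or "").lower()
--         return "lineitem" in source or "lineitem" in desc or "line item" in desc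
--
--     return {
--         "has_options": len(options) > 0,
--         "has_recommended": any(_recommended(o) for o in options),
--         "recommends_lineitem_grain": any(
--             _recommended(o) and _mentions_lineitem(o) for o in options
--         ),
--         "has_reasoning": any(o.get("reasoning") for o in options),
--     }
-- ===== Notes on version B (the rewrite author's own statement) =====
-- stated objective: simpler
-- what changed: Replaces A's single stateful loop that mutates a scores dict with four independent any()-based scans (one per flag), assembling the result dict once at the end.
import Mathlib
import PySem

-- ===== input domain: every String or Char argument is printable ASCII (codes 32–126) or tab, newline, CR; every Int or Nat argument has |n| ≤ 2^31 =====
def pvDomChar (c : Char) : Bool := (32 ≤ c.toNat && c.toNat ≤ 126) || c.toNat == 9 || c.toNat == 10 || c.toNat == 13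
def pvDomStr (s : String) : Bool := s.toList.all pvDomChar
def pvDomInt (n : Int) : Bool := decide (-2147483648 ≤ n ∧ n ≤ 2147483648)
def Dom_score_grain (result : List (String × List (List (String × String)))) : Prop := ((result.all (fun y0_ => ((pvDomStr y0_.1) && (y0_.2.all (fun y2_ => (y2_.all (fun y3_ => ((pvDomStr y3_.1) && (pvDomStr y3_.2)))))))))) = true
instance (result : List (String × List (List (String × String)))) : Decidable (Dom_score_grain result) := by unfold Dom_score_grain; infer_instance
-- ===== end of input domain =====

-- B replaces A's single stateful loop over a mutated scores dict with four
-- independent any-based scans; objective: simpler (same O(n) cost).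

-- ===== PORT A =====
-- one step of A's loop body on the running scores dict
def scoreGrainStepA (sc : PySem.Dict String Bool) (o : List (String × String)) : PySem.Dict String Bool :=
  let d := PySem.Dict.mk o
  let sc :=
    if d.getD "recommended" "" ≠ "" then
      let sc := sc.insert "has_recommended" true
      let source := PySem.Str.lower (d.getD "source_table" "")
      let desc := PySem.Str.lower (d.getD "description" "")
      if PySem.Str.isIn "lineitem" source || PySem.Str.isIn "lineitem" desc ||
         PySem.Str.isIn "line item" desc then
        sc.insert "recommends_lineitem_grain" true
      else sc
    else sc
  if d.getD "reasoning" "" ≠ "" then sc.insert "has_reasoning" true else sc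

def score_grain (result : List (String × List (List (String × String)))) : List (String × Bool) :=
  let options := (PySem.Dict.mk result).getD "options" []
  let scores : PySem.Dict String Bool :=
    ((((PySem.Dict.empty).insert "has_options" (decide (0 < options.length))).insert
        "has_recommended" false).insert
      "recommends_lineitem_grain" false).insert "has_reasoning" false
  (options.foldl scoreGrainStepA scores).items

-- ===== PORT B =====
def scoreGrainRecommendedB (o : List (String × String)) : Bool :=
  (PySem.Dict.mk o).getD "recommended" "" ≠ ""

def scoreGrainMentionsLineitemB (o : List (String × String)) : Bool :=
  let source := PySem.Str.lower ((PySem.Dict.mk o).getD "source_table" "")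
  let desc := PySem.Str.lower ((PySem.Dict.mk o).getD "description" "")
  PySem.Str.isIn "lineitem" source || PySem.Str.isIn "lineitem" desc ||
    PySem.Str.isIn "line item" desc

def score_grain_alt (result : List (String × List (List (String × String)))) : List (String × Bool) :=
  let options := (PySem.Dict.mk result).getD "options" []
  [("has_options", decide (0 < options.length)),
   ("has_recommended", options.any scoreGrainRecommendedB),
   ("recommends_lineitem_grain",
     options.any (fun o => scoreGrainRecommendedB o && scoreGrainMentionsLineitemB o)),
   ("has_reasoning", options.any (fun o => (PySem.Dict.mk o).getD "reasoning" "" ≠ ""))]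

-- ===== PRECONDITION & SPEC =====
def Spec_score_grain (result : List (String × List (List (String × String)))) (out : List (String × Bool)) : Prop := out = score_grain_alt result
instance (result : List (String × List (List (String × String)))) (out : List (String × Bool)) : Decidable (Spec_score_grain result out) := by unfold Spec_score_grain; infer_instance

-- ===== CLAIM (what is proved, stated in full; the proofs are below) =====
def Claim_equal_score_grain : Prop := ∀ (result : List (String × List (List (String × String)))), Dom_score_grain result → Spec_score_grain result (score_grain result)

-- ===== LEMMAS AND PROOFS =====

-- the scores dict A maintains, parameterised by its four flag values
def scoreGrainMkD (b0 b1 b2 b3 : Bool) : PySem.Dict String Bool :=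
  ((((PySem.Dict.empty).insert "has_options" b0).insert "has_recommended" b1).insert
    "recommends_lineitem_grain" b2).insert "has_reasoning" b3

lemma scoreGrainStepA_mkD (b0 b1 b2 b3 : Bool) (o : List (String × String)) :
    scoreGrainStepA (scoreGrainMkD b0 b1 b2 b3) o =
      scoreGrainMkD b0 (b1 || scoreGrainRecommendedB o)
        (b2 || (scoreGrainRecommendedB o && scoreGrainMentionsLineitemB o))
        (b3 || ((PySem.Dict.mk o).getD "reasoning" "" ≠ "")) := by
  unfold scoreGrainStepA scoreGrainMkD scoreGrainRecommendedB scoreGrainMentionsLineitemB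
  by_cases hr : (PySem.Dict.mk o).getD "recommended" "" ≠ "" <;>
  by_cases hm : (PySem.Str.isIn "lineitem" (PySem.Str.lower ((PySem.Dict.mk o).getD "source_table" "")) ||
      PySem.Str.isIn "lineitem" (PySem.Str.lower ((PySem.Dict.mk o).getD "description" "")) ||
      PySem.Str.isIn "line item" (PySem.Str.lower ((PySem.Dict.mk o).getD "description" ""))) = true <;>
  by_cases hs : (PySem.Dict.mk o).getD "reasoning" "" ≠ "" <;>
    apply PySem.Dict.ext <;>
    simp_all [PySem.Dict.insert, PySem.Dict.empty, PySem.Dict.contains]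

lemma scoreGrainFold (opts : List (List (String × String))) (b0 b1 b2 b3 : Bool) :
    opts.foldl scoreGrainStepA (scoreGrainMkD b0 b1 b2 b3) =
      scoreGrainMkD b0 (b1 || opts.any scoreGrainRecommendedB)
        (b2 || opts.any (fun o => scoreGrainRecommendedB o && scoreGrainMentionsLineitemB o))
        (b3 || opts.any (fun o => (PySem.Dict.mk o).getD "reasoning" "" ≠ "")) := by
  induction opts generalizing b1 b2 b3 with
  | nil => simp
  | cons o rest ih =>
      simp only [List.foldl_cons, scoreGrainStepA_mkD, ih, List.any_cons]
      rw [Bool.or_assoc, Bool.or_assoc, Bool.or_assoc]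

lemma scoreGrainMkD_items (b0 b1 b2 b3 : Bool) :
    (scoreGrainMkD b0 b1 b2 b3).items =
      [("has_options", b0), ("has_recommended", b1),
       ("recommends_lineitem_grain", b2), ("has_reasoning", b3)] := by
  unfold scoreGrainMkD
  simp [PySem.Dict.insert, PySem.Dict.empty, PySem.Dict.contains]

-- ===== VERDICT (by name: the statement is the Claim_ definition above) =====
theorem score_grain_spec : Claim_equal_score_grain := by
  intro result _
  unfold Spec_score_grain score_grain score_grain_alt
  show (List.foldl scoreGrainStepA (scoreGrainMkD _ false false false) _).items = _
  rw [scoreGrainFold, scoreGrainMkD_items]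
  simp
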